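-- pv_equiv track=rewrite | github.com/eugene-yujinwu/ce-oem-dut-checkbox-configuration | utils/scan.projects.manifests.py | merge_manifests
-- ===== SOURCE A (Python) =====
-- class ManifestMergeError(ValueError):
--
--     def __init__(self, diff1: dict, diff2: dict):
--         self.diff1 = diff1
--         self.diff2 = diff2
--
-- def merge_manifests(manifest_1: dict, manifest_2: dict, max_permissiveness: int = 1):
--
--     assert max_permissiveness > 0
--
--     true_fields_1 = set(field for field, value in manifest_1.items() if value is True)
--     true_fields_2 = set(field for field, value in manifest_2.items() if value is True)
--
--     # strict merging
--     true_fields_only_1 = true_fields_1 - true_fields_2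
--     true_fields_only_2 = true_fields_2 - true_fields_1
--
--     # we only merge if all fields that are true in one manifest are also
--     # true in the other (remember that the default value is false);
--     # anything else suggests an inconsistency
--     if true_fields_only_1 or true_fields_only_2:
--         if max_permissiveness == 1:
--             raise ManifestMergeError(true_fields_only_1, true_fields_only_2)
--     else:
--         return max_permissiveness, {**manifest_1, **manifest_2}
--
--     # true over default merging
--     false_fields_1 = set(field for field, value in manifest_1.items() if value is False)
--     false_fields_2 = set(field for field, value in manifest_2.items() if value is False)
--     inconsistencies_1 = true_fields_1.intersection(false_fields_2)
--     inconsistencies_2 = true_fields_2.intersection(false_fields_1)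
--     # we only merge if all fields that are true in one manifest are not
--     # *explicitly* set to false in the other;
--     if inconsistencies_1 or inconsistencies_2:
--         if max_permissiveness == 2:
--             raise ManifestMergeError(inconsistencies_1, inconsistencies_2)
--     else:
--         return max_permissiveness, {**manifest_1, **manifest_2}
--
--     # the merged result comprises all fields that are true in *any* of
--     # the manifests, along with any remaining false fields
--     return max_permissiveness, {
--         **{
--             field: value
--             for field, value in manifest_1.items()
--             if value is True or field not in true_fields_2
--         },
--         **{
--             field: value
--             for field, value in manifest_2.items()
--             if value is True or field not in true_fields_1
--         }
--
--     }
-- ===== SOURCE B (Python) =====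
-- class ManifestMergeError(ValueError):
--
--     def __init__(self, diff1: dict, diff2: dict):
--         self.diff1 = diff1
--         self.diff2 = diff2
--
--
-- def _score(v, w):
--     # conflict severity one field contributes: 0 = consistent,
--     # 1 = true on one side / defaulted on the other, 2 = true vs explicit false
--     if (v is True) != (w is True):
--         return 2 if (v is False or w is False) else 1
--     return 0
--
--
-- def merge_manifests(manifest_1: dict, manifest_2: dict, max_permissiveness: int = 1):
--     # Per-field severity scoring reduced with max, a single threshold test
--     # (raise iff max_permissiveness <= overall severity) and one uniform
--     # merge rule, instead of staged set-algebra checks with fall-throughs.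
--     assert max_permissiveness > 0
--
--     severity = 0
--     for field, value in manifest_1.items():
--         severity = max(severity, _score(value, manifest_2.get(field)))
--     for field, value in manifest_2.items():
--         if field not in manifest_1:
--             severity = max(severity, _score(None, value))
--
--     if 1 <= max_permissiveness <= severity:
--         true_1 = {f for f, v in manifest_1.items() if v is True}
--         true_2 = {f for f, v in manifest_2.items() if v is True}
--         if max_permissiveness == 1:
--             raise ManifestMergeError(true_1 - true_2, true_2 - true_1)
--         false_1 = {f for f, v in manifest_1.items() if v is False}
--         false_2 = {f for f, v in manifest_2.items() if v is False}
--         raise ManifestMergeError(true_1 & false_2, true_2 & false_1)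
--
--     merged = {f: v for f, v in manifest_1.items()
--               if not (v is False and manifest_2.get(f) is True)}
--     merged.update((f, v) for f, v in manifest_2.items()
--                   if not (v is False and manifest_1.get(f) is True))
--     return max_permissiveness, merged
-- ===== Notes on version B (the rewrite author's own statement) =====
-- stated objective: alternative
-- what changed: B replaces A's staged set-algebra checks with fall-through branches by per-field conflict-severity scoring (0/1/2) reduced with max over the union of keys, one threshold test (raise iff max_permissiveness <= overall severity) and a single uniform merge rule used on every non-raising path.
import Mathlib
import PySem

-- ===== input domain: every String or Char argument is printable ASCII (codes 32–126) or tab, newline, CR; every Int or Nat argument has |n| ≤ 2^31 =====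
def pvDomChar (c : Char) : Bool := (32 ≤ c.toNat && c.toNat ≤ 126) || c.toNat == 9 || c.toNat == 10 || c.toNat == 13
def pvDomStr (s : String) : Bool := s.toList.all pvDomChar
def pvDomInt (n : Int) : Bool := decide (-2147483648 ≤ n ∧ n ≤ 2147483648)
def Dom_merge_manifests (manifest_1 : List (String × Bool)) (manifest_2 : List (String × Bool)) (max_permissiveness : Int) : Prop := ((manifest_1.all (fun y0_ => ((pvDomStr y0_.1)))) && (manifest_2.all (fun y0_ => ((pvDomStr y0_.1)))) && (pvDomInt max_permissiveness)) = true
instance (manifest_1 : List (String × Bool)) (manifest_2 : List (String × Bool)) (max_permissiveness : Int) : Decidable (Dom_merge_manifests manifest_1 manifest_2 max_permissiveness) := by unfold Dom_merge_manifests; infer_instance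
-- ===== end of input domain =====

-- ===== PORT A =====
-- B replaces A's staged set-algebra checks/fall-throughs by per-field severity scoring
-- reduced with max, one threshold test, and a uniform merge rule (objective: alternative).
-- Where the Python A raises (AssertionError for max_permissiveness <= 0, ManifestMergeError
-- on a conflict at permissiveness 1/2) the ports return the junk value (0, []) and Pre_
-- excludes those inputs.
def merge_manifests (manifest_1 : List (String × Bool)) (manifest_2 : List (String × Bool)) (max_permissiveness : Int) : Int × (List (String × Bool)) :=
  if max_permissiveness ≤ 0 then (0, [])  -- assert max_permissiveness > 0 fails
  else
    let true_fields_1 := PySem.Set.ofList ((manifest_1.filter (fun p => p.2)).map (·.1))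
    let true_fields_2 := PySem.Set.ofList ((manifest_2.filter (fun p => p.2)).map (·.1))
    let true_fields_only_1 := PySem.Set.diff true_fields_1 true_fields_2
    let true_fields_only_2 := PySem.Set.diff true_fields_2 true_fields_1
    if true_fields_only_1 ≠ [] ∨ true_fields_only_2 ≠ [] then
      if max_permissiveness = 1 then (0, [])  -- raise ManifestMergeError
      else
        let false_fields_1 := PySem.Set.ofList ((manifest_1.filter (fun p => !p.2)).map (·.1))
        let false_fields_2 := PySem.Set.ofList ((manifest_2.filter (fun p => !p.2)).map (·.1))
        let inconsistencies_1 := PySem.Set.inter true_fields_1 false_fields_2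
        let inconsistencies_2 := PySem.Set.inter true_fields_2 false_fields_1
        if inconsistencies_1 ≠ [] ∨ inconsistencies_2 ≠ [] then
          if max_permissiveness = 2 then (0, [])  -- raise ManifestMergeError
          else
            (max_permissiveness,
              (PySem.Dict.update
                (PySem.Dict.ofList (manifest_1.filter (fun p => p.2 || !(true_fields_2.contains p.1))))
                (manifest_2.filter (fun p => p.2 || !(true_fields_1.contains p.1)))).items)
        else
          (max_permissiveness, (PySem.Dict.update (PySem.Dict.ofList manifest_1) manifest_2).items)
    else
      (max_permissiveness, (PySem.Dict.update (PySem.Dict.ofList manifest_1) manifest_2).items)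

-- ===== PORT B =====
-- _score(v, w): the conflict severity one field contributes (v, w = the field's value in
-- manifest_1 / manifest_2, none when absent)
def pvScore (v w : Option Bool) : Int :=
  if (v == some true) != (w == some true) then
    (if (v == some false) || (w == some false) then 2 else 1)
  else 0

def merge_manifests_alt (manifest_1 : List (String × Bool)) (manifest_2 : List (String × Bool)) (max_permissiveness : Int) : Int × (List (String × Bool)) :=
  if max_permissiveness ≤ 0 then (0, [])  -- assert max_permissiveness > 0 fails
  else
    let d1 := PySem.Dict.ofList manifest_1
    let d2 := PySem.Dict.ofList manifest_2
    let severity := manifest_1.foldl (fun s p => max s (pvScore (some p.2) (d2.get? p.1))) 0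
    let severity := manifest_2.foldl (fun s p => if !(d1.contains p.1) then max s (pvScore none (some p.2)) else s) severity
    if 1 ≤ max_permissiveness ∧ max_permissiveness ≤ severity then (0, [])  -- raise ManifestMergeError
    else
      let merged := PySem.Dict.ofList
        (manifest_1.filter (fun p => !((p.2 == false) && (d2.get? p.1 == some true))))
      (max_permissiveness,
        (PySem.Dict.update merged
          (manifest_2.filter (fun p => !((p.2 == false) && (d1.get? p.1 == some true))))).items)

-- ===== PRECONDITION & SPEC =====
-- Helpers for Pre_: does some entry make field f true / false in m?
def pvHasTrue (m : List (String × Bool)) (f : String) : Bool := m.any (fun q => q.1 == f && q.2)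
def pvHasFalse (m : List (String × Bool)) (f : String) : Bool := m.any (fun q => q.1 == f && !q.2)
-- some field is true in one manifest and not true in the other (A's strict-merge conflict)
def pvStrictConflict (m1 m2 : List (String × Bool)) : Bool :=
  m1.any (fun p => p.2 && !pvHasTrue m2 p.1) || m2.any (fun p => p.2 && !pvHasTrue m1 p.1)
-- some field is true in one manifest and explicitly false in the other
def pvInconsistent (m1 m2 : List (String × Bool)) : Bool :=
  m1.any (fun p => p.2 && pvHasFalse m2 p.1) || m2.any (fun p => p.2 && pvHasFalse m1 p.1)
-- Pre_ excludes exactly: association lists with duplicate keys (they do not denote a Python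
-- dict, A's argument type), and the inputs where A raises: max_permissiveness <= 0
-- (AssertionError) and the two ManifestMergeError branches.
def Pre_merge_manifests (manifest_1 : List (String × Bool)) (manifest_2 : List (String × Bool)) (max_permissiveness : Int) : Prop :=
  0 < max_permissiveness ∧
  (manifest_1.map Prod.fst).Nodup ∧ (manifest_2.map Prod.fst).Nodup ∧
  (pvStrictConflict manifest_1 manifest_2 = true → max_permissiveness ≠ 1) ∧
  (pvStrictConflict manifest_1 manifest_2 = true → pvInconsistent manifest_1 manifest_2 = true → max_permissiveness ≠ 2)
instance (manifest_1 : List (String × Bool)) (manifest_2 : List (String × Bool)) (max_permissiveness : Int) : Decidable (Pre_merge_manifests manifest_1 manifest_2 max_permissiveness) := by unfold Pre_merge_manifests; infer_instance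
def pvWitness_merge_manifests : (List (String × Bool)) × (List (String × Bool)) × Int :=
  ([("dmi", true), ("wifi", false)], [("dmi", true), ("net", true)], 3)

def Spec_merge_manifests (manifest_1 : List (String × Bool)) (manifest_2 : List (String × Bool)) (max_permissiveness : Int) (out : Int × (List (String × Bool))) : Prop := out = merge_manifests_alt manifest_1 manifest_2 max_permissiveness
instance (manifest_1 : List (String × Bool)) (manifest_2 : List (String × Bool)) (max_permissiveness : Int) (out : Int × (List (String × Bool))) : Decidable (Spec_merge_manifests manifest_1 manifest_2 max_permissiveness out) := by unfold Spec_merge_manifests; infer_instance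

-- ===== CLAIM (what is proved, stated in full; the proofs are below) =====
def Claim_equal_merge_manifests : Prop := ∀ (manifest_1 : List (String × Bool)) (manifest_2 : List (String × Bool)) (max_permissiveness : Int), Dom_merge_manifests manifest_1 manifest_2 max_permissiveness → Pre_merge_manifests manifest_1 manifest_2 max_permissiveness → Spec_merge_manifests manifest_1 manifest_2 max_permissiveness (merge_manifests manifest_1 manifest_2 max_permissiveness)

-- ===== LEMMAS AND PROOFS =====
lemma pv_items_update (d : PySem.Dict String Bool) (ps : List (String × Bool))
    (hd : ∀ p ∈ ps, d.contains p.1 = false) (hps : (ps.map Prod.fst).Nodup) :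
    (PySem.Dict.update d ps).items = d.items ++ ps := by
  induction ps generalizing d with
  | nil => simp [PySem.Dict.update]
  | cons p ps ih =>
    have hstep : PySem.Dict.update d (p :: ps) = PySem.Dict.update (d.insert p.1 p.2) ps := rfl
    have hpc : d.contains p.1 = false := hd p (by simp)
    have hd' : ∀ q ∈ ps, (d.insert p.1 p.2).contains q.1 = false := by
      intro q hq
      rw [PySem.Dict.contains_insert]
      have hne : q.1 ≠ p.1 := by
        simp only [List.map_cons, List.nodup_cons] at hps
        intro h; exact hps.1 (h ▸ List.mem_map_of_mem hq)
      simp [hne, hd q (by simp [hq])]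
    have hps' : (ps.map Prod.fst).Nodup := by
      simp only [List.map_cons, List.nodup_cons] at hps; exact hps.2
    rw [hstep, ih _ hd' hps', PySem.Dict.items_insert_of_not_contains d p.2 hpc]
    simp

lemma pv_items_ofList (m : List (String × Bool)) (h : (m.map Prod.fst).Nodup) :
    (PySem.Dict.ofList m).items = m := by
  have := pv_items_update PySem.Dict.empty m (fun p _ => PySem.Dict.contains_empty p.1) h
  simpa [PySem.Dict.ofList] using this

lemma pv_get?_iff (m : List (String × Bool)) (h : (m.map Prod.fst).Nodup) (f : String) (b : Bool) :
    ((PySem.Dict.ofList m).get? f = some b) ↔ (f, b) ∈ m := by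
  rw [PySem.Dict.get?_eq_some_iff_mem_items, pv_items_ofList m h]
  unfold PySem.Dict.keys
  rw [pv_items_ofList m h]
  exact h

lemma pv_contains_ofList (m : List (String × Bool)) (h : (m.map Prod.fst).Nodup) (f : String) :
    ((PySem.Dict.ofList m).contains f = true) ↔ f ∈ m.map Prod.fst := by
  rw [PySem.Dict.contains_iff_mem_keys]
  unfold PySem.Dict.keys
  rw [pv_items_ofList m h]

lemma pv_mem_trueset (m : List (String × Bool)) (f : String) :
    f ∈ PySem.Set.ofList ((m.filter (fun p => p.2)).map (·.1)) ↔ (f, true) ∈ m := by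
  rw [PySem.Set.mem_ofList]
  simp only [List.mem_map, List.mem_filter]
  constructor
  · rintro ⟨p, ⟨hp, hpt⟩, rfl⟩
    have : p = (p.1, true) := by cases p; simp_all
    exact this ▸ hp
  · intro hf; exact ⟨(f, true), ⟨hf, rfl⟩, rfl⟩

lemma pv_mem_falseset (m : List (String × Bool)) (f : String) :
    f ∈ PySem.Set.ofList ((m.filter (fun p => !p.2)).map (·.1)) ↔ (f, false) ∈ m := by
  rw [PySem.Set.mem_ofList]
  simp only [List.mem_map, List.mem_filter]
  constructor
  · rintro ⟨p, ⟨hp, hpt⟩, rfl⟩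
    have : p = (p.1, false) := by cases p; simp_all
    exact this ▸ hp
  · intro hf; exact ⟨(f, false), ⟨hf, rfl⟩, rfl⟩

lemma pv_strictA_iff (m1 m2 : List (String × Bool)) :
    (PySem.Set.diff (PySem.Set.ofList ((m1.filter (fun p => p.2)).map (·.1)))
        (PySem.Set.ofList ((m2.filter (fun p => p.2)).map (·.1))) ≠ [] ∨
     PySem.Set.diff (PySem.Set.ofList ((m2.filter (fun p => p.2)).map (·.1)))
        (PySem.Set.ofList ((m1.filter (fun p => p.2)).map (·.1))) ≠ []) ↔
    ((∃ f, (f, true) ∈ m1 ∧ (f, true) ∉ m2) ∨ (∃ f, (f, true) ∈ m2 ∧ (f, true) ∉ m1)) := by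
  simp only [ne_eq, List.eq_nil_iff_forall_not_mem, not_forall, not_not,
    PySem.Set.mem_diff, pv_mem_trueset]

lemma pv_inconA_iff (m1 m2 : List (String × Bool)) :
    (PySem.Set.inter (PySem.Set.ofList ((m1.filter (fun p => p.2)).map (·.1)))
        (PySem.Set.ofList ((m2.filter (fun p => !p.2)).map (·.1))) ≠ [] ∨
     PySem.Set.inter (PySem.Set.ofList ((m2.filter (fun p => p.2)).map (·.1)))
        (PySem.Set.ofList ((m1.filter (fun p => !p.2)).map (·.1))) ≠ []) ↔
    ((∃ f, (f, true) ∈ m1 ∧ (f, false) ∈ m2) ∨ (∃ f, (f, true) ∈ m2 ∧ (f, false) ∈ m1)) := by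
  simp only [ne_eq, List.eq_nil_iff_forall_not_mem, not_forall, not_not,
    PySem.Set.mem_inter, pv_mem_trueset, pv_mem_falseset]

lemma pv_hasTrue_iff (m : List (String × Bool)) (f : String) :
    pvHasTrue m f = true ↔ (f, true) ∈ m := by
  rw [pvHasTrue, List.any_eq_true]
  constructor
  · rintro ⟨q, hq, hp⟩
    simp only [Bool.and_eq_true, beq_iff_eq] at hp
    have : q = (f, true) := by cases q; simp_all
    exact this ▸ hq
  · intro h; exact ⟨(f, true), h, by simp⟩

lemma pv_hasFalse_iff (m : List (String × Bool)) (f : String) :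
    pvHasFalse m f = true ↔ (f, false) ∈ m := by
  rw [pvHasFalse, List.any_eq_true]
  constructor
  · rintro ⟨q, hq, hp⟩
    simp only [Bool.and_eq_true, beq_iff_eq, Bool.not_eq_true'] at hp
    have : q = (f, false) := by cases q; simp_all
    exact this ▸ hq
  · intro h; exact ⟨(f, false), h, by simp⟩

lemma pv_strictPre_iff (m1 m2 : List (String × Bool)) :
    (pvStrictConflict m1 m2 = true) ↔
    ((∃ f, (f, true) ∈ m1 ∧ (f, true) ∉ m2) ∨ (∃ f, (f, true) ∈ m2 ∧ (f, true) ∉ m1)) := by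
  unfold pvStrictConflict
  simp only [Bool.or_eq_true, List.any_eq_true, Bool.and_eq_true, Bool.not_eq_true',
    ← Bool.not_eq_true, pv_hasTrue_iff]
  constructor
  · rintro (⟨p, hp, h2, h3⟩ | ⟨p, hp, h2, h3⟩)
    · exact Or.inl ⟨p.1, by obtain ⟨a, b⟩ := p; simp_all, h3⟩
    · exact Or.inr ⟨p.1, by obtain ⟨a, b⟩ := p; simp_all, h3⟩
  · rintro (⟨f, h1, h2⟩ | ⟨f, h1, h2⟩)
    · exact Or.inl ⟨(f, true), h1, rfl, h2⟩
    · exact Or.inr ⟨(f, true), h1, rfl, h2⟩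

lemma pv_inconPre_iff (m1 m2 : List (String × Bool)) :
    (pvInconsistent m1 m2 = true) ↔
    ((∃ f, (f, true) ∈ m1 ∧ (f, false) ∈ m2) ∨ (∃ f, (f, true) ∈ m2 ∧ (f, false) ∈ m1)) := by
  unfold pvInconsistent
  simp only [Bool.or_eq_true, List.any_eq_true, Bool.and_eq_true, pv_hasFalse_iff]
  constructor
  · rintro (⟨p, hp, h2, h3⟩ | ⟨p, hp, h2, h3⟩)
    · exact Or.inl ⟨p.1, by obtain ⟨a, b⟩ := p; simp_all, h3⟩
    · exact Or.inr ⟨p.1, by obtain ⟨a, b⟩ := p; simp_all, h3⟩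
  · rintro (⟨f, h1, h2⟩ | ⟨f, h1, h2⟩)
    · exact Or.inl ⟨(f, true), h1, rfl, h2⟩
    · exact Or.inr ⟨(f, true), h1, rfl, h2⟩

-- the guarded max-fold reaches k iff the seed does or some admitted element scores >= k
lemma pv_foldl_gmax_ge_iff {α : Type} (l : List α) (c : α → Bool) (f : α → Int) (s0 k : Int) :
    (k ≤ l.foldl (fun s x => if c x then max s (f x) else s) s0) ↔
      (k ≤ s0 ∨ ∃ x ∈ l, c x = true ∧ k ≤ f x) := by
  induction l generalizing s0 with
  | nil => simp
  | cons x l ih =>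
    simp only [List.foldl_cons]
    by_cases hc : c x = true
    · rw [if_pos hc, ih]
      constructor
      · rintro (h | h)
        · rcases le_max_iff.mp h with h' | h'
          · exact Or.inl h'
          · exact Or.inr ⟨x, by simp, hc, h'⟩
        · obtain ⟨y, hy, hcy, hfy⟩ := h
          exact Or.inr ⟨y, by simp [hy], hcy, hfy⟩
      · rintro (h | ⟨y, hy, hcy, hfy⟩)
        · exact Or.inl (le_max_iff.mpr (Or.inl h))
        · rcases List.mem_cons.mp hy with rfl | hy'
          · exact Or.inl (le_max_iff.mpr (Or.inr hfy))
          · exact Or.inr ⟨y, hy', hcy, hfy⟩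
    · rw [if_neg hc, ih]
      constructor
      · rintro (h | ⟨y, hy, hcy, hfy⟩)
        · exact Or.inl h
        · exact Or.inr ⟨y, by simp [hy], hcy, hfy⟩
      · rintro (h | ⟨y, hy, hcy, hfy⟩)
        · exact Or.inl h
        · rcases List.mem_cons.mp hy with rfl | hy'
          · exact absurd hcy hc
          · exact Or.inr ⟨y, hy', hcy, hfy⟩

lemma pv_foldl_max_ge_iff {α : Type} (l : List α) (f : α → Int) (s0 k : Int) :
    (k ≤ l.foldl (fun s x => max s (f x)) s0) ↔ (k ≤ s0 ∨ ∃ x ∈ l, k ≤ f x) := by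
  have := pv_foldl_gmax_ge_iff l (fun _ => true) f s0 k
  simp only [if_pos] at this
  simpa using this

lemma pv_foldl_gmax_le {α : Type} (l : List α) (c : α → Bool) (f : α → Int) (s0 k : Int)
    (hs : s0 ≤ k) (hf : ∀ x, f x ≤ k) :
    l.foldl (fun s x => if c x then max s (f x) else s) s0 ≤ k := by
  induction l generalizing s0 with
  | nil => simpa
  | cons x l ih =>
    simp only [List.foldl_cons]
    split
    · exact ih _ (max_le hs (hf x))
    · exact ih _ hs

lemma pv_foldl_max_le {α : Type} (l : List α) (f : α → Int) (s0 k : Int)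
    (hs : s0 ≤ k) (hf : ∀ x, f x ≤ k) :
    l.foldl (fun s x => max s (f x)) s0 ≤ k := by
  induction l generalizing s0 with
  | nil => simpa
  | cons x l ih => exact ih _ (max_le hs (hf x))

lemma pvScore_le (v w : Option Bool) : pvScore v w ≤ 2 := by
  rw [pvScore]
  split
  · split <;> omega
  · omega

-- a key cannot be paired with both true and false under Nodup keys
lemma pv_unique (m : List (String × Bool)) (h : (m.map Prod.fst).Nodup) (f : String)
    (ht : (f, true) ∈ m) (hf : (f, false) ∈ m) : False := by
  induction m with
  | nil => simp at ht
  | cons q m ih =>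
    simp only [List.map_cons, List.nodup_cons] at h
    rcases List.mem_cons.mp ht with hq | ht'
    · rcases List.mem_cons.mp hf with hq' | hf'
      · rw [← hq] at hq'; simp at hq'
      · rw [← hq] at h
        exact h.1 (by simpa using List.mem_map_of_mem (f := Prod.fst) hf')
    · rcases List.mem_cons.mp hf with hq' | hf'
      · rw [← hq'] at h
        exact h.1 (by simpa using List.mem_map_of_mem (f := Prod.fst) ht')
      · exact ih h.2 ht' hf'

-- abbreviation for B's severity value (definitionally the fold in merge_manifests_alt)
def pvSeverity (m1 m2 : List (String × Bool)) : Int :=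
  m2.foldl (fun s p => if !((PySem.Dict.ofList m1).contains p.1) then max s (pvScore none (some p.2)) else s)
    (m1.foldl (fun s p => max s (pvScore (some p.2) ((PySem.Dict.ofList m2).get? p.1))) 0)

lemma pv_severity_ge_iff (m1 m2 : List (String × Bool)) (k : Int) :
    (k ≤ pvSeverity m1 m2) ↔
      (k ≤ 0 ∨ (∃ p ∈ m1, k ≤ pvScore (some p.2) ((PySem.Dict.ofList m2).get? p.1)) ∨
        (∃ p ∈ m2, ((PySem.Dict.ofList m1).contains p.1) = false ∧ k ≤ pvScore none (some p.2))) := by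
  unfold pvSeverity
  rw [pv_foldl_gmax_ge_iff, pv_foldl_max_ge_iff]
  simp only [Bool.not_eq_true', or_assoc]

lemma pv_severity_le (m1 m2 : List (String × Bool)) : pvSeverity m1 m2 ≤ 2 := by
  unfold pvSeverity
  exact pv_foldl_gmax_le _ _ _ _ _
    (pv_foldl_max_le _ _ _ _ (by omega) (fun x => pvScore_le _ _)) (fun x => pvScore_le _ _)

lemma pv_severity_one_iff (m1 m2 : List (String × Bool))
    (h1 : (m1.map Prod.fst).Nodup) (h2 : (m2.map Prod.fst).Nodup) :
    ((1 : Int) ≤ pvSeverity m1 m2) ↔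
    ((∃ f, (f, true) ∈ m1 ∧ (f, true) ∉ m2) ∨ (∃ f, (f, true) ∈ m2 ∧ (f, true) ∉ m1)) := by
  rw [pv_severity_ge_iff]
  constructor
  · rintro (h | ⟨⟨f, b⟩, hp, hs⟩ | ⟨⟨f, b⟩, hp, hc, hs⟩)
    · omega
    · cases b
      · -- (f, false) ∈ m1: score ≥ 1 forces m2.get? f = some true
        cases hw : (PySem.Dict.ofList m2).get? f with
        | none => rw [hw] at hs; simp [pvScore] at hs
        | some w =>
          cases w
          · rw [hw] at hs; simp [pvScore] at hs
          · refine Or.inr ⟨f, (pv_get?_iff m2 h2 f true).mp hw, fun hm => ?_⟩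
            exact pv_unique m1 h1 f hm hp
      · -- (f, true) ∈ m1: score ≥ 1 forces m2.get? f ≠ some true
        cases hw : (PySem.Dict.ofList m2).get? f with
        | none =>
          refine Or.inl ⟨f, hp, fun hm => ?_⟩
          rw [(pv_get?_iff m2 h2 f true).mpr hm] at hw; cases hw
        | some w =>
          cases w
          · refine Or.inl ⟨f, hp, fun hm => ?_⟩
            rw [(pv_get?_iff m2 h2 f true).mpr hm] at hw; cases hw
          · rw [hw] at hs; simp [pvScore] at hs
    · cases b
      · simp [pvScore] at hs
      · refine Or.inr ⟨f, hp, fun hm => ?_⟩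
        have : (PySem.Dict.ofList m1).contains f = true :=
          (pv_contains_ofList m1 h1 f).mpr (List.mem_map_of_mem (f := Prod.fst) hm)
        simp_all
  · rintro (⟨f, hf1, hf2⟩ | ⟨f, hf1, hf2⟩)
    · refine Or.inr (Or.inl ⟨(f, true), hf1, ?_⟩)
      cases hw : (PySem.Dict.ofList m2).get? f with
      | none => simp [pvScore]
      | some w =>
        cases w
        · simp [pvScore]
        · exact absurd ((pv_get?_iff m2 h2 f true).mp hw) hf2
    · by_cases hm : f ∈ m1.map Prod.fst
      · obtain ⟨⟨g, b⟩, hp, hpf⟩ := List.mem_map.mp hm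
        cases hpf
        cases b
        · refine Or.inr (Or.inl ⟨(g, false), hp, ?_⟩)
          rw [(pv_get?_iff m2 h2 g true).mpr hf1]
          simp [pvScore]
        · exact absurd hp hf2
      · refine Or.inr (Or.inr ⟨(f, true), hf1, ?_, by simp [pvScore]⟩)
        rw [← Bool.not_eq_true, pv_contains_ofList m1 h1]
        exact hm

lemma pv_severity_two_iff (m1 m2 : List (String × Bool))
    (_h1 : (m1.map Prod.fst).Nodup) (h2 : (m2.map Prod.fst).Nodup) :
    ((2 : Int) ≤ pvSeverity m1 m2) ↔
    ((∃ f, (f, true) ∈ m1 ∧ (f, false) ∈ m2) ∨ (∃ f, (f, true) ∈ m2 ∧ (f, false) ∈ m1)) := by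
  rw [pv_severity_ge_iff]
  constructor
  · rintro (h | ⟨⟨f, b⟩, hp, hs⟩ | ⟨⟨f, b⟩, hp, hc, hs⟩)
    · omega
    · cases hw : (PySem.Dict.ofList m2).get? f with
      | none => rw [hw] at hs; cases b <;> simp [pvScore] at hs
      | some w =>
        rw [hw] at hs
        cases b <;> cases w <;> simp [pvScore] at hs
        · exact Or.inr ⟨f, (pv_get?_iff m2 h2 f true).mp hw, hp⟩
        · exact Or.inl ⟨f, hp, (pv_get?_iff m2 h2 f false).mp hw⟩
    · cases b <;> simp [pvScore] at hs
  · rintro (⟨f, hf1, hf2⟩ | ⟨f, hf1, hf2⟩)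
    · refine Or.inr (Or.inl ⟨(f, true), hf1, ?_⟩)
      rw [(pv_get?_iff m2 h2 f false).mpr hf2]
      simp [pvScore]
    · refine Or.inr (Or.inl ⟨(f, false), hf2, ?_⟩)
      rw [(pv_get?_iff m2 h2 f true).mpr hf1]
      simp [pvScore]

lemma pv_filter_congr_1 (m1 m2 : List (String × Bool)) (h2 : (m2.map Prod.fst).Nodup) :
    m1.filter (fun p => p.2 || !((PySem.Set.ofList ((m2.filter (fun p => p.2)).map (·.1))).contains p.1)) =
    m1.filter (fun p => !((p.2 == false) && ((PySem.Dict.ofList m2).get? p.1 == some true))) := by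
  apply List.filter_congr
  intro p _
  have hm : ((PySem.Set.ofList ((m2.filter (fun p => p.2)).map (·.1))).contains p.1) =
      ((PySem.Dict.ofList m2).get? p.1 == some true) := by
    rw [Bool.eq_iff_iff]
    have hc : (PySem.Set.ofList ((m2.filter (fun p => p.2)).map (·.1))).contains p.1 = true ↔
        p.1 ∈ PySem.Set.ofList ((m2.filter (fun p => p.2)).map (·.1)) := by simp
    rw [hc, pv_mem_trueset, show (((PySem.Dict.ofList m2).get? p.1 == some true) = true ↔
        (PySem.Dict.ofList m2).get? p.1 = some true) from by simp, pv_get?_iff m2 h2]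
  rw [hm]
  cases p.2 <;> simp

-- when no field is true on one side and explicitly false on the other, B's filters keep everything
lemma pv_filter_eq_self (m1 m2 : List (String × Bool)) (h2 : (m2.map Prod.fst).Nodup)
    (hI : ¬ ((∃ f, (f, true) ∈ m1 ∧ (f, false) ∈ m2) ∨ (∃ f, (f, true) ∈ m2 ∧ (f, false) ∈ m1))) :
    m1.filter (fun p => !((p.2 == false) && ((PySem.Dict.ofList m2).get? p.1 == some true))) = m1 := by
  apply List.filter_eq_self.mpr
  intro p hp
  by_cases hb : p.2 = true
  · simp [hb]
  · have hb' : p.2 = false := by simp_all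
    have hne : (PySem.Dict.ofList m2).get? p.1 ≠ some true := by
      intro he
      exact hI (Or.inr ⟨p.1, (pv_get?_iff m2 h2 _ _).mp he, by obtain ⟨a, b⟩ := p; simp_all⟩)
    simp [hb', hne]

-- ===== VERDICT (by name: the statement is the Claim_ definition above) =====
set_option maxHeartbeats 2000000 in
theorem merge_manifests_spec : Claim_equal_merge_manifests := by
  intro m1 m2 mp hdom hpre
  obtain ⟨hmp, h1, h2, hr1, hr2⟩ := hpre
  unfold Spec_merge_manifests
  simp only [merge_manifests, merge_manifests_alt]
  rw [if_neg (by omega : ¬ mp ≤ 0), if_neg (by omega : ¬ mp ≤ 0)]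
  by_cases hS : ((∃ f, (f, true) ∈ m1 ∧ (f, true) ∉ m2) ∨ (∃ f, (f, true) ∈ m2 ∧ (f, true) ∉ m1))
  · have hA1 := (pv_strictA_iff m1 m2).mpr hS
    have hmp1 : mp ≠ 1 := hr1 ((pv_strictPre_iff m1 m2).mpr hS)
    rw [if_pos hA1, if_neg hmp1]
    by_cases hI : ((∃ f, (f, true) ∈ m1 ∧ (f, false) ∈ m2) ∨ (∃ f, (f, true) ∈ m2 ∧ (f, false) ∈ m1))
    · have hA2 := (pv_inconA_iff m1 m2).mpr hI
      have hmp2 : mp ≠ 2 := hr2 ((pv_strictPre_iff m1 m2).mpr hS) ((pv_inconPre_iff m1 m2).mpr hI)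
      have hnr : ¬ (1 ≤ mp ∧ mp ≤ pvSeverity m1 m2) := by
        intro ⟨ha, hb⟩
        have := pv_severity_le m1 m2
        omega
      unfold pvSeverity at hnr
      rw [if_pos hA2, if_neg hmp2, if_neg hnr,
        pv_filter_congr_1 m1 m2 h2, pv_filter_congr_1 m2 m1 h1]
    · have hA2 : ¬ ((PySem.Set.ofList ((m1.filter (fun p => p.2)).map (·.1))).inter
            (PySem.Set.ofList ((m2.filter (fun p => !p.2)).map (·.1))) ≠ [] ∨
          (PySem.Set.ofList ((m2.filter (fun p => p.2)).map (·.1))).inter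
            (PySem.Set.ofList ((m1.filter (fun p => !p.2)).map (·.1))) ≠ []) :=
        fun h => hI ((pv_inconA_iff m1 m2).mp h)
      have hnr : ¬ (1 ≤ mp ∧ mp ≤ pvSeverity m1 m2) := by
        intro ⟨ha, hb⟩
        have hlt : ¬ ((2 : Int) ≤ pvSeverity m1 m2) :=
          fun h => hI ((pv_severity_two_iff m1 m2 h1 h2).mp h)
        exact hmp1 (by omega)
      unfold pvSeverity at hnr
      rw [if_neg hA2, if_neg hnr, pv_filter_eq_self m1 m2 h2 hI]
      have hI' : ¬ ((∃ f, (f, true) ∈ m2 ∧ (f, false) ∈ m1) ∨ (∃ f, (f, true) ∈ m1 ∧ (f, false) ∈ m2)) :=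
        fun h => hI (h.elim Or.inr Or.inl)
      rw [pv_filter_eq_self m2 m1 h1 hI']
  · have hA1 : ¬ ((PySem.Set.ofList ((m1.filter (fun p => p.2)).map (·.1))).diff
          (PySem.Set.ofList ((m2.filter (fun p => p.2)).map (·.1))) ≠ [] ∨
        (PySem.Set.ofList ((m2.filter (fun p => p.2)).map (·.1))).diff
          (PySem.Set.ofList ((m1.filter (fun p => p.2)).map (·.1))) ≠ []) :=
      fun h => hS ((pv_strictA_iff m1 m2).mp h)
    have hI : ¬ ((∃ f, (f, true) ∈ m1 ∧ (f, false) ∈ m2) ∨ (∃ f, (f, true) ∈ m2 ∧ (f, false) ∈ m1)) := by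
      rintro (⟨f, ht, hf⟩ | ⟨f, ht, hf⟩)
      · exact hS (Or.inl ⟨f, ht, fun hm => pv_unique m2 h2 f hm hf⟩)
      · exact hS (Or.inr ⟨f, ht, fun hm => pv_unique m1 h1 f hm hf⟩)
    have hnr : ¬ (1 ≤ mp ∧ mp ≤ pvSeverity m1 m2) := by
      intro ⟨ha, hb⟩
      have hlt : ¬ ((1 : Int) ≤ pvSeverity m1 m2) :=
        fun h => hS ((pv_severity_one_iff m1 m2 h1 h2).mp h)
      omega
    unfold pvSeverity at hnr
    rw [if_neg hA1, if_neg hnr, pv_filter_eq_self m1 m2 h2 hI]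
    have hI' : ¬ ((∃ f, (f, true) ∈ m2 ∧ (f, false) ∈ m1) ∨ (∃ f, (f, true) ∈ m1 ∧ (f, false) ∈ m2)) :=
      fun h => hI (h.elim Or.inr Or.inl)
    rw [pv_filter_eq_self m2 m1 h1 hI']
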